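-- pv_equiv track=rewrite | github.com/Chibbluffy/advent-of-code-2025 | 10/main2.py | joltageStatus
-- ===== SOURCE A (Python) =====
-- def joltageStatus(joltage):
--     under = False
--     nonzeros = 0
--     for j in joltage:
--         if j < 0:
--             under = True
--         elif j != 0:
--             nonzeros += 1
--     if under:
--         return -1
--     elif nonzeros:
--         return 1
--     return 0
-- ===== SOURCE B (Python) =====
-- def joltageStatus(joltage):
--     if not joltage:
--         return 0
--     if min(joltage) < 0:
--         return -1
--     return 1 if max(joltage) > 0 else 0
-- ===== Notes on version B (the rewrite author's own statement) =====
-- stated objective: alternative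
-- what changed: Replaces A's element-wise flag-and-counter scan for negatives/nonzeros with computing the list's extremes (min and max) once and classifying by their signs: sign(min)<0 gives -1, else sign(max)>0 gives 1, else 0.
import Mathlib
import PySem

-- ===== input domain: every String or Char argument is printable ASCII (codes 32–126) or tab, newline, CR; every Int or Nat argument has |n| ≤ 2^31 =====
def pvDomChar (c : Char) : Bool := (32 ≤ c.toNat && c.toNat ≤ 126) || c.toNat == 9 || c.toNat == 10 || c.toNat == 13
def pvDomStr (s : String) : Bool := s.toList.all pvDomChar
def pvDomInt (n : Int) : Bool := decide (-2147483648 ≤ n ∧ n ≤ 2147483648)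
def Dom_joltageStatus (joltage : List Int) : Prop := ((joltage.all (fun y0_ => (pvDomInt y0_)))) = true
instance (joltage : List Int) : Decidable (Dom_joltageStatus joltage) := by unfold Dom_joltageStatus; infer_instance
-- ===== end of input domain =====

-- B classifies by the signs of the list's extremes (min/max computed once) instead of A's
-- element-wise flag-and-counter scan; an alternative of the same cost.
-- ===== PORT A =====
-- one pass maintaining (under, nonzeros), then decide from the two accumulators
def joltageStatus (joltage : List Int) : Int :=
  let s := joltage.foldl
    (fun (st : Bool × Int) j =>
      if j < 0 then (true, st.2)
      else if j ≠ 0 then (st.1, st.2 + 1)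
      else st)
    (false, 0)
  if s.1 then -1 else if s.2 ≠ 0 then 1 else 0

-- ===== PORT B =====
-- empty guard, then classify by sign of min, else sign of max
def joltageStatus_alt (joltage : List Int) : Int :=
  if joltage = [] then 0
  else
    match PySem.List.min? joltage (fun x => x) with
    | none => 0
    | some m =>
      if m < 0 then -1
      else
        match PySem.List.max? joltage (fun x => x) with
        | none => 0
        | some M => if M > 0 then 1 else 0

-- ===== PRECONDITION & SPEC =====
def Spec_joltageStatus (joltage : List Int) (out : Int) : Prop := out = joltageStatus_alt joltage
instance (joltage : List Int) (out : Int) : Decidable (Spec_joltageStatus joltage out) := by unfold Spec_joltageStatus; infer_instance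

-- ===== CLAIM =====
def Claim_equal_joltageStatus : Prop := ∀ (joltage : List Int), Dom_joltageStatus joltage → Spec_joltageStatus joltage (joltageStatus joltage)

-- ===== LEMMAS AND PROOFS =====

-- A's loop body
def pvStepA (st : Bool × Int) (j : Int) : Bool × Int :=
  if j < 0 then (true, st.2)
  else if j ≠ 0 then (st.1, st.2 + 1)
  else st

lemma pvFoldA_fst (l : List Int) : ∀ (b : Bool) (n : Int),
    (l.foldl pvStepA (b, n)).1 = (b || l.any (fun j => decide (j < 0))) := by
  induction l with
  | nil => simp
  | cons j t ih =>
    intro b n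
    simp only [List.foldl_cons, List.any_cons, pvStepA]
    split_ifs with h1 h2
    · simp [ih, h1]
    · simp [ih, h1]
    · simp [ih, h1]

lemma pvFoldA_snd (l : List Int) : ∀ (b : Bool) (n : Int),
    (l.foldl pvStepA (b, n)).2 = n + ((l.filter (fun j => decide (0 < j))).length : Int) := by
  induction l with
  | nil => simp
  | cons j t ih =>
    intro b n
    rcases lt_trichotomy j 0 with h1 | h1 | h1
    · have hnp : ¬ (0 < j) := by omega
      simp [pvStepA, h1, hnp, ih]
    · simp [pvStepA, h1, ih]
    · have hne : j ≠ 0 := by omega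
      have hnl : ¬ j < 0 := by omega
      simp only [List.foldl_cons, pvStepA, if_neg hnl, if_pos hne, List.filter_cons,
        decide_eq_true h1, if_pos, ih, List.length_cons]
      push_cast
      omega

-- ===== VERDICT =====
theorem joltageStatus_spec : Claim_equal_joltageStatus := by
  intro joltage _
  show joltageStatus joltage = joltageStatus_alt joltage
  unfold joltageStatus joltageStatus_alt
  simp only [show (fun (st : Bool × Int) j =>
      if j < 0 then (true, st.2)
      else if j ≠ 0 then (st.1, st.2 + 1)
      else st) = pvStepA from rfl]
  have hfst := pvFoldA_fst joltage false 0
  have hsnd := pvFoldA_snd joltage false 0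
  by_cases hne0 : joltage = []
  · subst hne0; simp
  · have hne : joltage ≠ [] := hne0
    rcases hmin : PySem.List.min? joltage (fun x => x) with _ | m
    · exact absurd (((PySem.List.min?_eq_none_iff _ _).mp hmin)) hne
    rcases hmax : PySem.List.max? joltage (fun x => x) with _ | M
    · exact absurd (((PySem.List.max?_eq_none_iff _ _).mp hmax)) hne
    have hmmem := PySem.List.min?_mem hmin
    have hMmem := PySem.List.max?_mem hmax
    have hmmin := PySem.List.min?_isMin hmin
    have hMmax := PySem.List.max?_isMax hmax
    simp only [if_neg hne]
    by_cases hm : m < 0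
    · have : joltage.any (fun j => decide (j < 0)) = true :=
        List.any_eq_true.mpr ⟨m, hmmem, decide_eq_true hm⟩
      simp [hfst, this, hm]
    · have hno : joltage.any (fun j => decide (j < 0)) = false := by
        rw [List.any_eq_false]
        intro j hj
        have := hmmin j hj
        intro hc
        have := of_decide_eq_true hc
        omega
      by_cases hM : 0 < M
      · have hmemf : M ∈ joltage.filter (fun j => decide (0 < j)) :=
          List.mem_filter.mpr ⟨hMmem, decide_eq_true hM⟩
        have hlen : 0 < (joltage.filter (fun j => decide (0 < j))).length :=
          List.length_pos_of_mem hmemf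
        have hlenZ : ((joltage.filter (fun j => decide (0 < j))).length : Int) ≠ 0 := by
          omega
        simp only [hfst, hsnd, hno, Bool.false_or, zero_add]
        simp only [if_neg (Bool.false_ne_true), if_pos hlenZ]
        rw [if_neg hm, if_pos hM]
      · have hfil : joltage.filter (fun j => decide (0 < j)) = [] := by
          rw [List.filter_eq_nil_iff]
          intro j hj
          have h1 := hMmax j hj
          intro hc
          have := of_decide_eq_true hc
          omega
        simp only [hfst, hsnd, hno, Bool.false_or, hfil, List.length_nil]
        norm_num
        rw [if_neg hm, if_neg hM]
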